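-- pv_equiv track=rewrite | github.com/JaneliaSciComp/napari-worm | napari_worm.py | _renumber_lattice_pairs
-- ===== SOURCE A (Python) =====
-- _SEAM_CELL_SEQUENCE = ['H0', 'H1', 'H2', 'V1', 'V2', 'V3', 'V4', 'V5', 'V6', 'T']
--
-- def _renumber_lattice_pairs(pair_infos: list[dict]) -> list[dict]:
--     """Re-label all lattice pair names based on positional order.
--
--     Matches MIPAV's updateSeamCount() (LatticeModel.java:8859).
--     Walks through pairs nose→tail, numbering seam and non-seam independently:
--       - Non-seam:  a0, a1, a2, ...
--       - Seam (≤10 total): H0, H1, H2, V1, V2, V3, V4, V5, V6, T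
--     """
--     seam_count = 0
--     lattice_count = 0
--     for info in pair_infos:
--         if info['type'] == 'seam':
--             if seam_count < len(_SEAM_CELL_SEQUENCE):
--                 info['name'] = _SEAM_CELL_SEQUENCE[seam_count]
--             else:
--                 info['name'] = f'S{seam_count}'
--             seam_count += 1
--         else:
--             info['name'] = f'a{lattice_count}'
--             lattice_count += 1
--     return pair_infos
-- ===== SOURCE B (Python) =====
-- _SEAM_CELL_SEQUENCE = ['H0', 'H1', 'H2', 'V1', 'V2', 'V3', 'V4', 'V5', 'V6', 'T']
--
--
-- def _renumber_lattice_pairs(pair_infos: list[dict]) -> list[dict]: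
--     """Label each pair from its positional rank: element i's rank in its group
--     is recomputed as the number of seams in the prefix pair_infos[:i] (non-seam
--     rank = i - that count), with no running counters threaded through the loop."""
--     for i, info in enumerate(pair_infos):
--         k = sum(1 for p in pair_infos[:i] if p['type'] == 'seam')
--         if info['type'] == 'seam':
--             info['name'] = _SEAM_CELL_SEQUENCE[k] if k < len(_SEAM_CELL_SEQUENCE) else f'S{k}'
--         else:
--             info['name'] = f'a{i - k}'
--     return pair_infos
-- ===== Notes on version B (the rewrite author's own statement) =====
-- stated objective: alternative
-- what changed: B drops A's threaded seam/non-seam running counters and instead computes each element's label directly from a closed-form positional rank: the number of seams in the prefix pair_infos[:i] (and i minus it for non-seams), recounted per element.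
import Mathlib
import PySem

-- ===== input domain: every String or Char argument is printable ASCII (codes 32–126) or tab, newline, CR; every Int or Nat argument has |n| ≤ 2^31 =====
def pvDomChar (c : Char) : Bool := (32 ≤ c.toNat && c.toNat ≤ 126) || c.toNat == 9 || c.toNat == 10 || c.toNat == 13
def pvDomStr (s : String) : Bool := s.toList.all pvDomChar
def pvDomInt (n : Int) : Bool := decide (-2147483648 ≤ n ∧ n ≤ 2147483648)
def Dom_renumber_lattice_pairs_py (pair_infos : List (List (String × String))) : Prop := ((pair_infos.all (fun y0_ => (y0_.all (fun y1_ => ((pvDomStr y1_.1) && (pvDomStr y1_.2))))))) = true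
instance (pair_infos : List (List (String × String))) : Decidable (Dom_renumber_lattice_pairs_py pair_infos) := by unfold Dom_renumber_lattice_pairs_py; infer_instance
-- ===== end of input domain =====

-- Both Pythons mutate the input dicts in place and return the same list; the equivalence
-- proved here is about the RETURN value (the list of updated dicts).
-- B's change: each element's label is computed from its positional rank (seams counted in
-- its prefix) instead of threading running counters through the loop.

-- shared dict primitives (association list, first match; d[k]=v overwrites in place, else appends)
def dget (info : List (String × String)) (k : String) : Option String :=
  match info with
  | [] => none
  | (a, b) :: t => if a == k then some b else dget t k

def dset (info : List (String × String)) (k v : String) : List (String × String) :=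
  match info with
  | [] => [(k, v)]
  | (a, b, ) :: t => if a == k then (a, v) :: t else (a, b) :: dset t k v

-- shared test: info['type'] == 'seam' (KeyError when 'type' absent — excluded by Pre_)
def isSeam (info : List (String × String)) : Bool := (dget info "type").getD "" == "seam"

def seamSeq : List String := ["H0", "H1", "H2", "V1", "V2", "V3", "V4", "V5", "V6", "T"]

-- ===== PORT A =====
def stepA (st : Int × Int × List (List (String × String))) (info : List (String × String)) :
    Int × Int × List (List (String × String)) :=
  let sc := st.1; let lc := st.2.1; let acc := st.2.2
  if isSeam info then
    let nm := if sc < (seamSeq.length : Int) then (PySem.List.pyGet? seamSeq sc).getD ""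
              else "S" ++ PySem.Int.toStr sc
    (sc + 1, lc, acc ++ [dset info "name" nm])
  else
    (sc, lc + 1, acc ++ [dset info "name" ("a" ++ PySem.Int.toStr lc)])

def renumber_lattice_pairs_py (pair_infos : List (List (String × String))) : List (List (String × String)) :=
  (pair_infos.foldl stepA (0, 0, [])).2.2

-- ===== PORT B =====
-- _SEAM_CELL_SEQUENCE[k] if k < len(...) else f'S{k}'
def seamName (k : Int) : String :=
  if k < (seamSeq.length : Int) then (PySem.List.pyGet? seamSeq k).getD ""
  else "S" ++ PySem.Int.toStr k

-- the per-element body: k = sum(1 for p in pair_infos[:i] if p['type']=='seam')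
def bodyB (ys : List (List (String × String))) (p : Int × List (String × String)) :
    List (String × String) :=
  let k : Int := ((PySem.List.slice ys none (some p.1)).countP (fun q => isSeam q) : Nat)
  if isSeam p.2 then dset p.2 "name" (seamName k)
  else dset p.2 "name" ("a" ++ PySem.Int.toStr (p.1 - k))

def renumber_lattice_pairs_py_alt (pair_infos : List (List (String × String))) : List (List (String × String)) :=
  (PySem.List.enumerate pair_infos 0).map (bodyB pair_infos)

-- ===== PRECONDITION & SPEC =====
-- Pre_ excludes exactly the inputs where A raises KeyError: a dict without the key 'type'.
def Pre_renumber_lattice_pairs_py (pair_infos : List (List (String × String))) : Prop :=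
  (pair_infos.all (fun info => (info.map Prod.fst).contains "type")) = true
instance (pair_infos : List (List (String × String))) : Decidable (Pre_renumber_lattice_pairs_py pair_infos) := by
  unfold Pre_renumber_lattice_pairs_py; infer_instance

def pvWitness_renumber_lattice_pairs_py : (List (List (String × String))) :=
  [[("type", "seam")], [("type", "pair")]]

def Spec_renumber_lattice_pairs_py (pair_infos : List (List (String × String))) (out : List (List (String × String))) : Prop := out = renumber_lattice_pairs_py_alt pair_infos
instance (pair_infos : List (List (String × String))) (out : List (List (String × String))) : Decidable (Spec_renumber_lattice_pairs_py pair_infos out) := by unfold Spec_renumber_lattice_pairs_py; infer_instance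

-- ===== CLAIM (what is proved, stated in full; the proofs are below) =====
def Claim_equal_renumber_lattice_pairs_py : Prop := ∀ (pair_infos : List (List (String × String))), Dom_renumber_lattice_pairs_py pair_infos → Pre_renumber_lattice_pairs_py pair_infos → Spec_renumber_lattice_pairs_py pair_infos (renumber_lattice_pairs_py pair_infos)

-- ===== LEMMAS AND PROOFS =====

-- the common reference labelling, structural in the list with explicit counters
def labelList (xs : List (List (String × String))) (sc lc : Int) : List (List (String × String)) :=
  match xs with
  | [] => []
  | x :: t =>
    if isSeam x then dset x "name" (seamName sc) :: labelList t (sc + 1) lc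
    else dset x "name" ("a" ++ PySem.Int.toStr lc) :: labelList t sc (lc + 1)

lemma foldA_eq (xs : List (List (String × String))) (sc lc : Int) (acc : List (List (String × String))) :
    (xs.foldl stepA (sc, lc, acc)).2.2 = acc ++ labelList xs sc lc := by
  induction xs generalizing sc lc acc with
  | nil => simp [labelList]
  | cons x t ih =>
    rw [List.foldl_cons]
    by_cases h : isSeam x
    · simp only [stepA, h, if_pos, labelList, ih, List.append_assoc, List.singleton_append,
        seamName]
    · simp only [stepA, h, Bool.false_eq_true, if_false, labelList, ih, List.append_assoc,
        List.singleton_append]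

lemma mapB_eq (t pre : List (List (String × String))) :
    (PySem.List.enumerate t (pre.length : Int)).map (bodyB (pre ++ t)) =
      labelList t ((pre.countP (fun q => isSeam q) : Nat) : Int)
        (((pre.length - pre.countP (fun q => isSeam q) : Nat) : Int)) := by
  induction t generalizing pre with
  | nil => simp [PySem.List.enumerate_nil, labelList]
  | cons x t ih =>
    rw [PySem.List.enumerate_cons, List.map_cons, labelList]
    have hk : (PySem.List.slice (pre ++ x :: t) none (some (pre.length : Int))).countP
        (fun q => isSeam q) = pre.countP (fun q => isSeam q) := by
      rw [PySem.List.slice_to_natCast]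
      simp
    have hle : pre.countP (fun q => isSeam q) ≤ pre.length := List.countP_le_length
    have htail := ih (pre ++ [x])
    rw [List.append_assoc] at htail
    simp only [List.singleton_append, List.length_append, List.length_cons,
      List.length_nil, Nat.zero_add] at htail
    by_cases h : isSeam x
    · have hcnt : (pre ++ [x]).countP (fun q => isSeam q) = pre.countP (fun q => isSeam q) + 1 := by
        simp [List.countP_append, h]
      have hsub : pre.length + 1 - (pre.countP (fun q => isSeam q) + 1)
          = pre.length - pre.countP (fun q => isSeam q) := by omega
      rw [hcnt, hsub] at htail
      rw [if_pos h, List.cons_eq_cons]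
      refine ⟨by simp only [bodyB, hk, h, if_pos], ?_⟩
      exact_mod_cast htail
    · have hcnt : (pre ++ [x]).countP (fun q => isSeam q) = pre.countP (fun q => isSeam q) := by
        simp [List.countP_append, h]
      have hsub : pre.length + 1 - pre.countP (fun q => isSeam q)
          = (pre.length - pre.countP (fun q => isSeam q)) + 1 := by omega
      rw [hcnt, hsub] at htail
      rw [if_neg (by simp [h]), List.cons_eq_cons]
      refine ⟨?_, by exact_mod_cast htail⟩
      simp only [bodyB, hk, h, Bool.false_eq_true, if_false]
      congr 3
      omega

-- ===== VERDICT (by name: the statement is the Claim_ definition above) =====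
theorem renumber_lattice_pairs_py_spec : Claim_equal_renumber_lattice_pairs_py := by
  intro xs _ _
  show renumber_lattice_pairs_py xs = renumber_lattice_pairs_py_alt xs
  unfold renumber_lattice_pairs_py renumber_lattice_pairs_py_alt
  have h := mapB_eq xs []
  simp only [List.nil_append, List.length_nil, Nat.cast_zero, List.countP_nil, Nat.sub_self] at h
  rw [foldA_eq, List.nil_append, h]
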